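-- pv_equiv track=rewrite | github.com/modabada/codingTest | algorithm_lv2/lightCycle/main.py | solution
-- ===== SOURCE A (Python) =====
-- def solution(grid):
--     answer = []
--     width = len(grid[0])
--     height = len(grid)
--     # board = [[[False] * 4] * width] * height  <- 메모리주소 복사로 배열 요소들이 독립되지 않음
--     board = [[[False for _ in range(4)] for _ in range(width)] for _ in range(height)]
--
--     for i in range(height):
--         for j in range(width):
--             for d in range(4):
--                 # shoot
--                 y = i
--                 x = j
--                 direction = d
--                 length = 0
--                 while True:
--                     if board[y][x][direction]:
--                         if length != 0:
--                             answer.append(length)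
--                         break
--
--                     board[y][x][direction] = True
--                     length += 1
--
--                     if direction == 0:
--                         y = (y if y != 0 else height) - 1
--                     elif direction == 1:
--                         x = x + 1 if x + 1 < width else 0
--                     elif direction == 2:
--                         y = y + 1 if y + 1 < height else 0
--                     else:
--                         x = (x if x != 0 else width) - 1
--
--                     if grid[y][x] == 'R':
--                         direction = direction + 1 if direction != 3 else 0
--                     elif grid[y][x] == 'L':
--                         direction = direction - 1 if direction != 0 else 3
--     return sorted(answer)
-- ===== SOURCE B (Python) =====
-- def solution(grid):
--     height = len(grid)
--     width = len(grid[0])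
--
--     def step(y, x, d):
--         if d == 0:
--             y = (y + height - 1) % height
--         elif d == 1:
--             x = (x + 1) % width
--         elif d == 2:
--             y = (y + 1) % height
--         else:
--             x = (x + width - 1) % width
--         c = grid[y][x]
--         if c == 'R':
--             d = (d + 1) % 4
--         elif c == 'L':
--             d = (d + 3) % 4
--         return y, x, d
--
--     # no visited storage: each cycle is reported exactly at its lexicographically
--     # smallest state; a walk aborts as soon as it meets a smaller state
--     answer = []
--     for y in range(height):
--         for x in range(width):
--             for d in range(4):
--                 length = 1
--                 cur = step(y, x, d)
--                 while cur != (y, x, d):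
--                     if cur < (y, x, d):
--                         length = 0
--                         break
--                     length += 1
--                     cur = step(*cur)
--                 if length:
--                     answer.append(length)
--     return sorted(answer)
-- ===== Notes on version B (the rewrite author's own statement) =====
-- stated objective: alternative
-- what changed: B drops A's 3D visited board entirely: the move+reflect step is a permutation, so B reports each cycle exactly once at its lexicographically smallest state (y,x,d), walking each cycle with O(1) extra memory and aborting as soon as a smaller state is met, instead of A's mark-and-stop walk over a height*width*4 boolean board.
import Mathlib
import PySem

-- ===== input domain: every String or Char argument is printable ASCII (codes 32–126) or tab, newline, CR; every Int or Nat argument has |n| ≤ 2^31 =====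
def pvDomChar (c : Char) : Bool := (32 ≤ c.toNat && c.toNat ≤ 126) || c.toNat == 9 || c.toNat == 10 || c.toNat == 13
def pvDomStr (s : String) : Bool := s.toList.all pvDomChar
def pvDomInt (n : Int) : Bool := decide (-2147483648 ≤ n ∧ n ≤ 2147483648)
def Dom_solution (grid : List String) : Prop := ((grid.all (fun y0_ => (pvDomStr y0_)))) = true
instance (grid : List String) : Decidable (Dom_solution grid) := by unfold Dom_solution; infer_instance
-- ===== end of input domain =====

-- B replaces A's 3D visited board by a memory-free cycle-leader scan: each cycle of the
-- move+reflect permutation is reported exactly at its lexicographically smallest state,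
-- a walk aborting as soon as it meets a smaller state; equality of the RETURN value is
-- proved on Pre_solution (exactly the inputs where the Python A returns).

-- ===== PORT A =====
-- grid[y][x] as a Char; indices are in range under Pre_solution (the getD defaults are never read there)
def pvGridChar (grid : List String) (y x : Nat) : Char :=
  ((grid.getD y "").toList).getD x ' '

def pvBoardGet (b : List (List (List Bool))) (y x d : Nat) : Bool :=
  ((b.getD y []).getD x []).getD d false

def pvBoardSet (b : List (List (List Bool))) (y x d : Nat) : List (List (List Bool)) :=
  b.set y ((b.getD y []).set x (((b.getD y []).getD x []).set d true))

-- A's 'while True' shoot loop; fuel 4*height*width+1 always suffices (proved below)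
def pvShoot (grid : List String) (height width : Nat) :
    Nat → List (List (List Bool)) → Nat → Nat → Nat → Nat → List Int →
    List Int × List (List (List Bool))
  | 0, board, _, _, _, _, answer => (answer, board)
  | fuel+1, board, y, x, direction, length, answer =>
    if pvBoardGet board y x direction then
      ((if length ≠ 0 then answer ++ [(length : Int)] else answer), board)
    else
      let board' := pvBoardSet board y x direction
      let length' := length + 1
      let y' := if direction = 0 then (if y ≠ 0 then y else height) - 1
                else if direction = 2 then (if y + 1 < height then y + 1 else 0) else y
      let x' := if direction = 1 then (if x + 1 < width then x + 1 else 0)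
                else if direction = 3 then (if x ≠ 0 then x else width) - 1 else x
      let direction' :=
        if pvGridChar grid y' x' = 'R' then (if direction ≠ 3 then direction + 1 else 0)
        else if pvGridChar grid y' x' = 'L' then (if direction ≠ 0 then direction - 1 else 3)
        else direction
      pvShoot grid height width fuel board' y' x' direction' length' answer

def solution (grid : List String) : List Int :=
  let width := (grid.getD 0 "").toList.length
  let height := grid.length
  let board : List (List (List Bool)) :=
    (List.range height).map (fun _ => (List.range width).map (fun _ => (List.range 4).map (fun _ => false)))
  let res := (List.range height).foldl (fun acc i =>
      (List.range width).foldl (fun acc j =>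
        (List.range 4).foldl (fun (acc : List Int × List (List (List Bool))) d =>
          pvShoot grid height width (4 * height * width + 1) acc.2 i j d 0 acc.1) acc) acc)
    (([] : List Int), board)
  PySem.List.sorted res.1 (fun v => v) false

-- ===== PORT B =====
-- B's step function (move on the torus, then reflect), on (y, x, d) triples
def pvStepB (grid : List String) (h w : Nat) (t : Nat × Nat × Nat) : Nat × Nat × Nat :=
  let y := t.1
  let x := t.2.1
  let d := t.2.2
  let y' := if d = 0 then (y + h - 1) % h else if d = 2 then (y + 1) % h else y
  let x' := if d = 1 then (x + 1) % w else if d = 3 then (x + w - 1) % w else x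
  let c := pvGridChar grid y' x'
  let d' := if c = 'R' then (d + 1) % 4 else if c = 'L' then (d + 3) % 4 else d
  (y', x', d')

-- Python's lexicographic 'cur < (y, x, d)' on triples
def pvLtT (a b : Nat × Nat × Nat) : Bool :=
  decide (a.1 < b.1) ||
    (decide (a.1 = b.1) &&
      (decide (a.2.1 < b.2.1) || (decide (a.2.1 = b.2.1) && decide (a.2.2 < b.2.2))))

-- B's while loop: walk until back at the start (return the length) or until a
-- lexicographically smaller state is met (return 0); fuel 4*h*w+1 always suffices
def pvWalkB (grid : List String) (h w : Nat) (t0 : Nat × Nat × Nat) :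
    Nat → (Nat × Nat × Nat) → Nat → Nat
  | 0, _, len => len
  | fuel+1, cur, len =>
    if cur = t0 then len
    else if pvLtT cur t0 then 0
    else pvWalkB grid h w t0 fuel (pvStepB grid h w cur) (len + 1)

def solution_alt (grid : List String) : List Int :=
  let height := grid.length
  let width := (grid.getD 0 "").toList.length
  let answer := (List.range height).foldl (fun acc y =>
    (List.range width).foldl (fun acc x =>
      (List.range 4).foldl (fun (acc : List Int) d =>
        let len := pvWalkB grid height width (y, x, d) (4 * height * width + 1)
          (pvStepB grid height width (y, x, d)) 1
        if len ≠ 0 then acc ++ [(len : Int)] else acc) acc) acc) ([] : List Int)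
  PySem.List.sorted answer (fun v => v) false

-- ===== PRECONDITION & SPEC =====
-- Pre_solution holds exactly where the Python A returns: A raises IndexError on the empty
-- grid (grid[0]) and whenever some accessed row is shorter than len(grid[0]).
def Pre_solution (grid : List String) : Prop :=
  grid ≠ [] ∧ ∀ r ∈ grid, (grid.getD 0 "").toList.length ≤ r.toList.length

instance (grid : List String) : Decidable (Pre_solution grid) := by
  unfold Pre_solution; infer_instance

def pvWitness_solution : List String := ["RL", ".R"]

def Spec_solution (grid : List String) (out : List Int) : Prop := out = solution_alt grid
instance (grid : List String) (out : List Int) : Decidable (Spec_solution grid out) := by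
  unfold Spec_solution; infer_instance

-- ===== CLAIM (what is proved, stated in full; the proofs are below) =====
def Claim_equal_solution : Prop :=
  ∀ (grid : List String), Dom_solution grid → Pre_solution grid → Spec_solution grid (solution grid)

-- ===== LEMMAS AND PROOFS =====

-- the shared abstract successor on flat state codes s = (y*w+x)*4+d (proof-side only)
def pvNext (grid : List String) (height width : Nat) (s : Nat) : Nat :=
  let d := s % 4
  let r := s / 4
  let x := r % width
  let y := r / width
  let y' := if d = 0 then (y + height - 1) % height else if d = 2 then (y + 1) % height else y
  let x' := if d = 1 then (x + 1) % width else if d = 3 then (x + width - 1) % width else x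
  let c := pvGridChar grid y' x'
  let d' := if c = 'R' then (d + 1) % 4 else if c = 'L' then (d + 3) % 4 else d
  (y' * width + x') * 4 + d'

-- ---------- abstract layer: a walk on an injective map of [0,N) ----------

def pvWalkG (f : Nat → Nat) : Nat → Finset Nat → Nat → Option (Nat × Finset Nat)
  | 0, _, _ => none
  | fuel+1, V, s =>
    if s ∈ V then some (0, V)
    else (pvWalkG f fuel (insert s V) (f s)).map (fun r => (r.1 + 1, r.2))

def pvProcess (f : Nat → Nat) (N : Nat) :
    List Nat → Finset Nat → List Int → Option (List Int × Finset Nat)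
  | [], V, ans => some (ans, V)
  | s :: rest, V, ans =>
    match pvWalkG f (N+1) V s with
    | none => none
    | some (p, V') => pvProcess f N rest V' (ans ++ (if p ≠ 0 then [(p : Int)] else []))

def pvStable (f : Nat → Nat) (N : Nat) (V : Finset Nat) : Prop :=
  (∀ s ∈ V, s < N) ∧ (∀ s ∈ V, f s ∈ V)

def pvImg (f : Nat → Nat) (s0 m : Nat) : Finset Nat :=
  (Finset.range m).image (fun k => f^[k] s0)

theorem pvIter_lt (f : Nat → Nat) (N : Nat) (hf : ∀ s, s < N → f s < N)
    (k s : Nat) (hs : s < N) : f^[k] s < N := by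
  induction k with
  | zero => simpa using hs
  | succ k ih => rw [Function.iterate_succ_apply']; exact hf _ ih

theorem pvBack (f : Nat → Nat) (N : Nat)
    (hinj : ∀ a b, a < N → b < N → f a = f b → a = b)
    (V : Finset Nat) (hV : pvStable f N V) (t : Nat) (ht : t < N)
    (h : f t ∈ V) : t ∈ V := by
  have himg : V.image f = V := by
    apply Finset.eq_of_subset_of_card_le
    · intro u hu
      rcases Finset.mem_image.mp hu with ⟨v, hv, rfl⟩
      exact hV.2 v hv
    · rw [Finset.card_image_of_injOn]
      intro a ha b hb hab
      exact hinj a b (hV.1 a ha) (hV.1 b hb) hab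
  rw [← himg] at h
  rcases Finset.mem_image.mp h with ⟨u, hu, huv⟩
  have := hinj u t (hV.1 u hu) ht huv
  rwa [← this]

theorem pvBackIter (f : Nat → Nat) (N : Nat) (hf : ∀ s, s < N → f s < N)
    (hinj : ∀ a b, a < N → b < N → f a = f b → a = b)
    (V : Finset Nat) (hV : pvStable f N V) (m s : Nat) (hs : s < N)
    (h : f^[m] s ∈ V) : s ∈ V := by
  induction m with
  | zero => simpa using h
  | succ m ih =>
    rw [Function.iterate_succ_apply'] at h
    exact ih (pvBack f N hinj V hV _ (pvIter_lt f N hf m s hs) h)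

theorem pvCancel (f : Nat → Nat) (N : Nat) (hf : ∀ s, s < N → f s < N)
    (hinj : ∀ a b, a < N → b < N → f a = f b → a = b)
    (s : Nat) (hs : s < N) :
    ∀ i j, i ≤ j → f^[j] s = f^[i] s → f^[j - i] s = s := by
  intro i
  induction i with
  | zero => intro j _ h; simpa using h
  | succ i ih =>
    intro j hij h
    obtain ⟨j', rfl⟩ : ∃ j', j = j' + 1 := ⟨j - 1, by omega⟩
    rw [Function.iterate_succ_apply', Function.iterate_succ_apply'] at h
    have h' := hinj _ _ (pvIter_lt f N hf j' s hs) (pvIter_lt f N hf i s hs) h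
    have := ih j' (by omega) h'
    simpa [Nat.succ_sub_succ] using this

theorem pvPeriodic (f : Nat → Nat) (N : Nat) (hf : ∀ s, s < N → f s < N)
    (hinj : ∀ a b, a < N → b < N → f a = f b → a = b)
    (s : Nat) (hs : s < N) : ∃ m, 0 < m ∧ f^[m] s = s := by
  have hmaps : ∀ k ∈ Finset.range (N + 1), f^[k] s ∈ Finset.range N := by
    intro k _
    exact Finset.mem_range.mpr (pvIter_lt f N hf k s hs)
  obtain ⟨i, hi, j, hj, hne, heq⟩ :=
    Finset.exists_ne_map_eq_of_card_lt_of_maps_to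
      (by simp : (Finset.range N).card < (Finset.range (N + 1)).card) hmaps
  rcases Nat.lt_or_ge i j with h | h
  · exact ⟨j - i, by omega, pvCancel f N hf hinj s hs i j (by omega) heq.symm⟩
  · have : j < i := by omega
    exact ⟨i - j, by omega, pvCancel f N hf hinj s hs j i (by omega) heq⟩

theorem pvPeriod_pos (f : Nat → Nat) (N : Nat) (hf : ∀ s, s < N → f s < N)
    (hinj : ∀ a b, a < N → b < N → f a = f b → a = b)
    (s : Nat) (hs : s < N) :
    0 < Function.minimalPeriod f s ∧ f^[Function.minimalPeriod f s] s = s := by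
  obtain ⟨m, hm, hper⟩ := pvPeriodic f N hf hinj s hs
  have hP : Function.IsPeriodicPt f m s := hper
  constructor
  · exact hP.minimalPeriod_pos hm
  · exact Function.isPeriodicPt_minimalPeriod f s

theorem pvOrbit_ne (f : Nat → Nat) (N : Nat) (hf : ∀ s, s < N → f s < N)
    (hinj : ∀ a b, a < N → b < N → f a = f b → a = b)
    (s : Nat) (hs : s < N) (i j : Nat) (hij : i < j)
    (hj : j < Function.minimalPeriod f s) : f^[i] s ≠ f^[j] s := by
  intro h
  have h' := pvCancel f N hf hinj s hs i j (by omega) h.symm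
  have hP : Function.IsPeriodicPt f (j - i) s := h'
  have := hP.minimalPeriod_le (by omega)
  omega

theorem pvPeriod_le (f : Nat → Nat) (N : Nat) (hf : ∀ s, s < N → f s < N)
    (hinj : ∀ a b, a < N → b < N → f a = f b → a = b)
    (s : Nat) (hs : s < N) : Function.minimalPeriod f s ≤ N := by
  have hcard : (Finset.range (Function.minimalPeriod f s)).card ≤ (Finset.range N).card := by
    apply Finset.card_le_card_of_injOn (fun k => f^[k] s)
    · intro k hk
      exact Finset.mem_range.mpr (pvIter_lt f N hf k s hs)
    · intro a ha b hb hab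
      by_contra hne
      rcases Nat.lt_or_ge a b with h | h
      · exact pvOrbit_ne f N hf hinj s hs a b h (Finset.mem_range.mp hb) hab
      · exact pvOrbit_ne f N hf hinj s hs b a (by omega) (Finset.mem_range.mp ha) hab.symm
  simpa using hcard

theorem pvImg_zero (f : Nat → Nat) (s0 : Nat) : pvImg f s0 0 = ∅ := by
  simp [pvImg]

theorem pvImg_succ (f : Nat → Nat) (s0 m : Nat) :
    pvImg f s0 (m + 1) = insert (f^[m] s0) (pvImg f s0 m) := by
  simp [pvImg, Finset.range_add_one]

theorem pvMem_img (f : Nat → Nat) (s0 m t : Nat) :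
    t ∈ pvImg f s0 m ↔ ∃ k, k < m ∧ f^[k] s0 = t := by
  simp [pvImg]

theorem pvStable_union_img (f : Nat → Nat) (N : Nat) (hf : ∀ s, s < N → f s < N)
    (hinj : ∀ a b, a < N → b < N → f a = f b → a = b)
    (V : Finset Nat) (hV : pvStable f N V) (s0 : Nat) (hs0 : s0 < N) :
    pvStable f N (V ∪ pvImg f s0 (Function.minimalPeriod f s0)) := by
  obtain ⟨hp, hfix⟩ := pvPeriod_pos f N hf hinj s0 hs0
  constructor
  · intro s hs
    rcases Finset.mem_union.mp hs with h | h
    · exact hV.1 s h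
    · rcases (pvMem_img f s0 _ s).mp h with ⟨k, _, rfl⟩
      exact pvIter_lt f N hf k s0 hs0
  · intro s hs
    rcases Finset.mem_union.mp hs with h | h
    · exact Finset.mem_union_left _ (hV.2 s h)
    · rcases (pvMem_img f s0 _ s).mp h with ⟨k, hk, rfl⟩
      apply Finset.mem_union_right
      rw [show f (f^[k] s0) = f^[k+1] s0 from (Function.iterate_succ_apply' f k s0).symm]
      rcases Nat.lt_or_ge (k + 1) (Function.minimalPeriod f s0) with h' | h'
      · exact (pvMem_img f s0 _ _).mpr ⟨k + 1, h', rfl⟩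
      · have : k + 1 = Function.minimalPeriod f s0 := by omega
        rw [this, hfix]
        exact (pvMem_img f s0 _ _).mpr ⟨0, by omega, rfl⟩

-- the A-walk from a fresh start traverses exactly the cycle of s0
theorem pvWalkG_orbit (f : Nat → Nat) (N : Nat) (hf : ∀ s, s < N → f s < N)
    (hinj : ∀ a b, a < N → b < N → f a = f b → a = b)
    (V : Finset Nat) (hV : pvStable f N V) (s0 : Nat) (hs0 : s0 < N) (hfresh : s0 ∉ V) :
    ∀ fuel m, m < Function.minimalPeriod f s0 → Function.minimalPeriod f s0 - m < fuel →
      pvWalkG f fuel (V ∪ pvImg f s0 m) (f^[m] s0) =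
        some (Function.minimalPeriod f s0 - m,
              V ∪ pvImg f s0 (Function.minimalPeriod f s0)) := by
  obtain ⟨hp, hfix⟩ := pvPeriod_pos f N hf hinj s0 hs0
  intro fuel
  induction fuel with
  | zero => intro m _ h; omega
  | succ fuel ih =>
    intro m hm hfuel
    have hcur_not : f^[m] s0 ∉ V ∪ pvImg f s0 m := by
      intro hmem
      rcases Finset.mem_union.mp hmem with h | h
      · exact hfresh (pvBackIter f N hf hinj V hV m s0 hs0 h)
      · rcases (pvMem_img f s0 m _).mp h with ⟨k, hk, hkeq⟩
        exact pvOrbit_ne f N hf hinj s0 hs0 k m hk hm hkeq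
    rw [pvWalkG, if_neg hcur_not]
    have hins : insert (f^[m] s0) (V ∪ pvImg f s0 m) = V ∪ pvImg f s0 (m + 1) := by
      rw [pvImg_succ, Finset.union_insert]
    have hstep : f (f^[m] s0) = f^[m + 1] s0 := (Function.iterate_succ_apply' f m s0).symm
    rcases Nat.lt_or_ge (m + 1) (Function.minimalPeriod f s0) with hlt | hge
    · rw [hins, hstep, ih (m + 1) hlt (by omega)]
      simp only [Option.map_some]
      congr 2
      omega
    · have hmp : m + 1 = Function.minimalPeriod f s0 := by omega
      obtain ⟨fuel', rfl⟩ : ∃ fuel', fuel = fuel' + 1 := ⟨fuel - 1, by omega⟩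
      have hmem0 : s0 ∈ V ∪ pvImg f s0 (m + 1) :=
        Finset.mem_union_right _ ((pvMem_img f s0 _ _).mpr ⟨0, by omega, rfl⟩)
      rw [hins, hstep, hmp, hfix, pvWalkG, if_pos (by rw [← hmp]; exact hmem0)]
      simp only [Option.map_some, Option.some.injEq, Prod.mk.injEq]
      exact ⟨by omega, trivial⟩

theorem pvWalkG_fresh (f : Nat → Nat) (N : Nat) (hf : ∀ s, s < N → f s < N)
    (hinj : ∀ a b, a < N → b < N → f a = f b → a = b)
    (V : Finset Nat) (hV : pvStable f N V) (s0 : Nat) (hs0 : s0 < N) (hfresh : s0 ∉ V) :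
    pvWalkG f (N + 1) V s0 =
      some (Function.minimalPeriod f s0,
            V ∪ pvImg f s0 (Function.minimalPeriod f s0)) := by
  have h := pvWalkG_orbit f N hf hinj V hV s0 hs0 hfresh (N + 1) 0
    ((pvPeriod_pos f N hf hinj s0 hs0).1)
    (by have := pvPeriod_le f N hf hinj s0 hs0; omega)
  simpa [pvImg_zero] using h

theorem pvWalkG_visited (f : Nat → Nat) (fuel : Nat) (V : Finset Nat) (s : Nat)
    (h : s ∈ V) : pvWalkG f (fuel + 1) V s = some (0, V) := by
  rw [pvWalkG, if_pos h]

-- ---------- concrete layer: the step on flat codes (y*w+x)*4+d ----------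

-- A's conditional move / reflect, as used verbatim inside pvShoot
def pvStepY (h y d : Nat) : Nat :=
  if d = 0 then (if y ≠ 0 then y else h) - 1
  else if d = 2 then (if y + 1 < h then y + 1 else 0) else y

def pvStepX (w x d : Nat) : Nat :=
  if d = 1 then (if x + 1 < w then x + 1 else 0)
  else if d = 3 then (if x ≠ 0 then x else w) - 1 else x

def pvStepD (grid : List String) (y' x' d : Nat) : Nat :=
  if pvGridChar grid y' x' = 'R' then (if d ≠ 3 then d + 1 else 0)
  else if pvGridChar grid y' x' = 'L' then (if d ≠ 0 then d - 1 else 3) else d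

theorem pvDec4 (k d : Nat) (hd : d < 4) : (k * 4 + d) % 4 = d ∧ (k * 4 + d) / 4 = k := by
  omega

theorem pvDecW (w y x : Nat) (hx : x < w) : (y * w + x) % w = x ∧ (y * w + x) / w = y := by
  have h1 : (y * w + x) % w = x % w := by
    rw [mul_comm, Nat.mul_add_mod]
  have h2 : (w * y + x) / w = y + x / w := Nat.mul_add_div (by omega) y x
  refine ⟨?_, ?_⟩
  · rw [h1, Nat.mod_eq_of_lt hx]
  · rw [mul_comm] at h2 ⊢
    rw [mul_comm y w] at h2
    rw [h2, Nat.div_eq_of_lt hx]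
    omega

theorem pvModDec (h y : Nat) (hy : y < h) : (y + h - 1) % h = (if y ≠ 0 then y else h) - 1 := by
  by_cases h0 : y = 0
  · subst h0
    simp only [if_neg (by omega : ¬ (0 : Nat) ≠ 0), Nat.zero_add]
    exact Nat.mod_eq_of_lt (by omega)
  · rw [if_pos h0]
    have : y + h - 1 = (y - 1) + h := by omega
    rw [this, Nat.add_mod_right, Nat.mod_eq_of_lt (by omega)]

theorem pvModInc (h y : Nat) (hy : y < h) : (y + 1) % h = if y + 1 < h then y + 1 else 0 := by
  by_cases hlt : y + 1 < h
  · rw [if_pos hlt, Nat.mod_eq_of_lt hlt]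
  · rw [if_neg hlt]
    have : y + 1 = h := by omega
    rw [this, Nat.mod_self]

theorem pvStepY_lt (h y d : Nat) (hy : y < h) : pvStepY h y d < h := by
  unfold pvStepY; split_ifs <;> omega

theorem pvStepX_lt (w x d : Nat) (hx : x < w) : pvStepX w x d < w := by
  unfold pvStepX; split_ifs <;> omega

theorem pvStepD_lt (grid : List String) (y' x' d : Nat) (hd : d < 4) :
    pvStepD grid y' x' d < 4 := by
  unfold pvStepD; split_ifs <;> omega

-- B's triple step agrees with A's conditional step under the bounds
theorem pvStepB_eq (grid : List String) (h w y x d : Nat)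
    (hy : y < h) (hx : x < w) (hd : d < 4) :
    pvStepB grid h w (y, x, d) =
      (pvStepY h y d, pvStepX w x d, pvStepD grid (pvStepY h y d) (pvStepX w x d) d) := by
  unfold pvStepB
  dsimp only
  have hsy : (if d = 0 then (y + h - 1) % h else if d = 2 then (y + 1) % h else y) =
      pvStepY h y d := by
    unfold pvStepY
    interval_cases d <;> simp [pvModDec h y hy, pvModInc h y hy]
  have hsx : (if d = 1 then (x + 1) % w else if d = 3 then (x + w - 1) % w else x) =
      pvStepX w x d := by
    unfold pvStepX
    interval_cases d <;> simp [pvModDec w x hx, pvModInc w x hx]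
  rw [hsy, hsx]
  have hsd : (if pvGridChar grid (pvStepY h y d) (pvStepX w x d) = 'R' then (d + 1) % 4
      else if pvGridChar grid (pvStepY h y d) (pvStepX w x d) = 'L' then (d + 3) % 4 else d) =
      pvStepD grid (pvStepY h y d) (pvStepX w x d) d := by
    unfold pvStepD
    split_ifs <;> omega
  rw [hsd]

-- the abstract successor on codes agrees with A's step
theorem pvNext_enc (grid : List String) (h w y x d : Nat)
    (hy : y < h) (hx : x < w) (hd : d < 4) :
    pvNext grid h w ((y * w + x) * 4 + d) =
      (pvStepY h y d * w + pvStepX w x d) * 4 +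
        pvStepD grid (pvStepY h y d) (pvStepX w x d) d := by
  unfold pvNext
  simp only [(pvDec4 (y * w + x) d hd).1, (pvDec4 (y * w + x) d hd).2,
    (pvDecW w y x hx).1, (pvDecW w y x hx).2]
  have hsy : (if d = 0 then (y + h - 1) % h else if d = 2 then (y + 1) % h else y) =
      pvStepY h y d := by
    unfold pvStepY
    interval_cases d <;> simp [pvModDec h y hy, pvModInc h y hy]
  have hsx : (if d = 1 then (x + 1) % w else if d = 3 then (x + w - 1) % w else x) =
      pvStepX w x d := by
    unfold pvStepX
    interval_cases d <;> simp [pvModDec w x hx, pvModInc w x hx]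
  rw [hsy, hsx]
  have hsd : (if pvGridChar grid (pvStepY h y d) (pvStepX w x d) = 'R' then (d + 1) % 4
      else if pvGridChar grid (pvStepY h y d) (pvStepX w x d) = 'L' then (d + 3) % 4 else d) =
      pvStepD grid (pvStepY h y d) (pvStepX w x d) d := by
    unfold pvStepD
    split_ifs <;> omega
  rw [hsd]

-- decomposition of a flat code into its (y, x, d) triple
theorem pvDecomp (h w s : Nat) (hs : s < 4 * h * w) :
    s / 4 / w < h ∧ s / 4 % w < w ∧ s % 4 < 4 ∧
      (s / 4 / w * w + s / 4 % w) * 4 + s % 4 = s := by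
  have hw : 0 < w := by
    rcases Nat.eq_zero_or_pos w with h0 | h0
    · subst h0; simp at hs
    · exact h0
  have hh : 0 < h := by
    rcases Nat.eq_zero_or_pos h with h0 | h0
    · subst h0; simp at hs
    · exact h0
  have h4 : s / 4 < h * w := by
    rw [Nat.div_lt_iff_lt_mul (by omega : (0:Nat) < 4)]
    calc s < 4 * h * w := hs
    _ = h * w * 4 := by ring
  refine ⟨?_, Nat.mod_lt _ hw, Nat.mod_lt _ (by omega), ?_⟩
  · rw [Nat.div_lt_iff_lt_mul hw]
    exact h4
  · have e1 : s / 4 / w * w + s / 4 % w = s / 4 := Nat.div_add_mod' (s / 4) w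
    have e2 : s / 4 * 4 + s % 4 = s := Nat.div_add_mod' s 4
    rw [e1, e2]

theorem pvEnc_lt (h w y x d : Nat) (hy : y < h) (hx : x < w) (hd : d < 4) :
    (y * w + x) * 4 + d < 4 * h * w := by
  have h1 : y * w + x < h * w := by
    calc y * w + x < y * w + w := by omega
    _ = (y + 1) * w := by ring
    _ ≤ h * w := Nat.mul_le_mul_right w (by omega)
  calc (y * w + x) * 4 + d < (y * w + x) * 4 + 4 := by omega
  _ = (y * w + x + 1) * 4 := by ring
  _ ≤ (h * w) * 4 := Nat.mul_le_mul_right 4 (by omega)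
  _ = 4 * h * w := by ring

theorem pvEnc_inj (w y1 x1 d1 y2 x2 d2 : Nat) (hx1 : x1 < w) (hd1 : d1 < 4)
    (hx2 : x2 < w) (hd2 : d2 < 4)
    (h : (y1 * w + x1) * 4 + d1 = (y2 * w + x2) * 4 + d2) :
    y1 = y2 ∧ x1 = x2 ∧ d1 = d2 := by
  have e1 := pvDec4 (y1 * w + x1) d1 hd1
  have e2 := pvDec4 (y2 * w + x2) d2 hd2
  have hd : d1 = d2 := by rw [← e1.1, ← e2.1, h]
  have hk : y1 * w + x1 = y2 * w + x2 := by rw [← e1.2, ← e2.2, h]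
  have f1 := pvDecW w y1 x1 hx1
  have f2 := pvDecW w y2 x2 hx2
  have hx : x1 = x2 := by rw [← f1.1, ← f2.1, hk]
  have hy : y1 = y2 := by rw [← f1.2, ← f2.2, hk]
  exact ⟨hy, hx, hd⟩

theorem pvNext_lt (grid : List String) (h w s : Nat) (hs : s < 4 * h * w) :
    pvNext grid h w s < 4 * h * w := by
  obtain ⟨hy, hx, hd, hdec⟩ := pvDecomp h w s hs
  rw [← hdec, pvNext_enc grid h w _ _ _ hy hx hd]
  exact pvEnc_lt h w _ _ _ (pvStepY_lt h _ _ hy) (pvStepX_lt w _ _ hx)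
    (pvStepD_lt grid _ _ _ hd)

theorem pvStepD_inj (grid : List String) (y' x' d1 d2 : Nat) (hd1 : d1 < 4) (hd2 : d2 < 4)
    (h : pvStepD grid y' x' d1 = pvStepD grid y' x' d2) : d1 = d2 := by
  unfold pvStepD at h
  split_ifs at h <;> omega

theorem pvStepY_inj (h y1 y2 d : Nat) (hy1 : y1 < h) (hy2 : y2 < h)
    (heq : pvStepY h y1 d = pvStepY h y2 d) : y1 = y2 := by
  unfold pvStepY at heq
  split_ifs at heq <;> omega

theorem pvStepX_inj (w x1 x2 d : Nat) (hx1 : x1 < w) (hx2 : x2 < w)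
    (heq : pvStepX w x1 d = pvStepX w x2 d) : x1 = x2 := by
  unfold pvStepX at heq
  split_ifs at heq <;> omega

theorem pvNext_inj (grid : List String) (h w a b : Nat)
    (ha : a < 4 * h * w) (hb : b < 4 * h * w)
    (heq : pvNext grid h w a = pvNext grid h w b) : a = b := by
  obtain ⟨hy1, hx1, hd1, hdec1⟩ := pvDecomp h w a ha
  obtain ⟨hy2, hx2, hd2, hdec2⟩ := pvDecomp h w b hb
  rw [← hdec1, ← hdec2] at heq ⊢
  rw [pvNext_enc grid h w _ _ _ hy1 hx1 hd1, pvNext_enc grid h w _ _ _ hy2 hx2 hd2] at heq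
  obtain ⟨hY, hX, hD⟩ := pvEnc_inj w _ _ _ _ _ _
    (pvStepX_lt w _ _ hx1) (pvStepD_lt grid _ _ _ hd1)
    (pvStepX_lt w _ _ hx2) (pvStepD_lt grid _ _ _ hd2) heq
  rw [hY, hX] at hD
  have hd : a % 4 = b % 4 := pvStepD_inj grid _ _ _ _ hd1 hd2 hD
  rw [hd] at hY hX
  have hy : a / 4 / w = b / 4 / w := pvStepY_inj h _ _ _ hy1 hy2 hY
  have hx : a / 4 % w = b / 4 % w := pvStepX_inj w _ _ _ hx1 hx2 hX
  rw [hy, hx, hd]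

-- ---------- list couplings: A's 3D board as a Finset of codes ----------

theorem pvGetD_set_self {α : Type} (l : List α) (i : Nat) (a d : α) (h : i < l.length) :
    (l.set i a).getD i d = a := by
  rw [List.getD_eq_getElem?_getD, List.getElem?_set_self (by simpa using h)]
  rfl

theorem pvGetD_set_ne {α : Type} (l : List α) (i j : Nat) (a d : α) (h : i ≠ j) :
    (l.set i a).getD j d = l.getD j d := by
  rw [List.getD_eq_getElem?_getD, List.getElem?_set_ne h, ← List.getD_eq_getElem?_getD]

theorem pvGetD_map_range {α : Type} (f : Nat → α) (n i : Nat) (d : α) (h : i < n) :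
    ((List.range n).map f).getD i d = f i := by
  rw [List.getD_eq_getElem?_getD, List.getElem?_map, List.getElem?_range h]
  rfl

def pvBoardInv (h w : Nat) (b : List (List (List Bool))) (V : Finset Nat) : Prop :=
  b.length = h ∧
  (∀ y, y < h → (b.getD y []).length = w) ∧
  (∀ y x, y < h → x < w → ((b.getD y []).getD x []).length = 4) ∧
  (∀ y x d, y < h → x < w → d < 4 →
    (pvBoardGet b y x d = true ↔ (y * w + x) * 4 + d ∈ V))

theorem pvBoardInv_init (h w : Nat) :
    pvBoardInv h w
      ((List.range h).map (fun _ => (List.range w).map (fun _ => (List.range 4).map (fun _ => false))))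
      ∅ := by
  refine ⟨by simp, ?_, ?_, ?_⟩
  · intro y hy
    rw [pvGetD_map_range _ h y [] hy]
    simp
  · intro y x hy hx
    rw [pvGetD_map_range _ h y [] hy, pvGetD_map_range _ w x [] hx]
    simp
  · intro y x d hy hx hd
    unfold pvBoardGet
    rw [pvGetD_map_range _ h y [] hy, pvGetD_map_range _ w x [] hx,
      pvGetD_map_range _ 4 d false hd]
    simp

theorem pvBoardInv_set (h w : Nat) (b : List (List (List Bool))) (V : Finset Nat)
    (inv : pvBoardInv h w b V) (y x d : Nat) (hy : y < h) (hx : x < w) (hd : d < 4) :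
    pvBoardInv h w (pvBoardSet b y x d) (insert ((y * w + x) * 4 + d) V) := by
  obtain ⟨hlen, hrow, hcell, hget⟩ := inv
  have hylen : y < b.length := by omega
  have hrownew : (pvBoardSet b y x d).getD y [] =
      ((b.getD y []).set x (((b.getD y []).getD x []).set d true)) := by
    unfold pvBoardSet
    exact pvGetD_set_self b y _ [] hylen
  have hrowold : ∀ y', y' ≠ y → (pvBoardSet b y x d).getD y' [] = b.getD y' [] := by
    intro y' hne
    unfold pvBoardSet
    exact pvGetD_set_ne b y y' _ [] (fun hc => hne hc.symm)
  refine ⟨by unfold pvBoardSet; simpa using hlen, ?_, ?_, ?_⟩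
  · intro y' hy'
    by_cases hc : y' = y
    · subst hc; rw [hrownew]; simpa using hrow y' hy'
    · rw [hrowold y' hc]; exact hrow y' hy'
  · intro y' x' hy' hx'
    by_cases hc : y' = y
    · subst hc
      rw [hrownew]
      by_cases hcx : x' = x
      · subst hcx
        rw [pvGetD_set_self _ x' _ [] (by rw [hrow y' hy']; omega)]
        simpa using hcell y' x' hy' hx'
      · rw [pvGetD_set_ne _ x x' _ [] (fun hc2 => hcx hc2.symm)]
        exact hcell y' x' hy' hx'
    · rw [hrowold y' hc]; exact hcell y' x' hy' hx'
  · intro y' x' d' hy' hx' hd'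
    unfold pvBoardGet
    by_cases hcy : y' = y
    · subst hcy
      rw [hrownew]
      by_cases hcx : x' = x
      · subst hcx
        rw [pvGetD_set_self _ x' _ [] (by rw [hrow y' hy']; omega)]
        by_cases hcd : d' = d
        · subst hcd
          rw [pvGetD_set_self _ d' _ false (by rw [hcell y' x' hy' hx']; omega)]
          simp
        · rw [pvGetD_set_ne _ d d' _ false (fun hc2 => hcd hc2.symm)]
          rw [Finset.mem_insert]
          have := hget y' x' d' hy' hx' hd'
          unfold pvBoardGet at this
          rw [this]
          simp [hcd]
      · rw [pvGetD_set_ne _ x x' _ [] (fun hc2 => hcx hc2.symm)]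
        rw [Finset.mem_insert]
        have hne : ¬ (y' * w + x') * 4 + d' = (y' * w + x) * 4 + d := by
          intro hc2
          exact hcx (pvEnc_inj w y' x' d' y' x d hx' hd' hx hd hc2).2.1
        have := hget y' x' d' hy' hx' hd'
        unfold pvBoardGet at this
        rw [this]
        simp [hne]
    · rw [hrowold y' hcy]
      rw [Finset.mem_insert]
      have hne : ¬ (y' * w + x') * 4 + d' = (y * w + x) * 4 + d := by
        intro hc2
        exact hcy (pvEnc_inj w y' x' d' y x d hx' hd' hx hd hc2).1
      have := hget y' x' d' hy' hx' hd'
      unfold pvBoardGet at this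
      rw [this]
      simp [hne]

-- ---------- simulation: A's shoot loop against the abstract walk ----------

theorem pvShootSim (grid : List String) (h w : Nat) :
    ∀ fuel (V V' : Finset Nat) (b : List (List (List Bool))) (y x d len : Nat)
      (ans : List Int) (p : Nat),
      pvBoardInv h w b V → y < h → x < w → d < 4 →
      pvWalkG (pvNext grid h w) fuel V ((y * w + x) * 4 + d) = some (p, V') →
      ∃ b', pvShoot grid h w fuel b y x d len ans =
          ((if len + p ≠ 0 then ans ++ [((len + p : Nat) : Int)] else ans), b') ∧
        pvBoardInv h w b' V' := by
  intro fuel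
  induction fuel with
  | zero =>
    intro V V' b y x d len ans p _ _ _ _ hwalk
    simp [pvWalkG] at hwalk
  | succ fuel ih =>
    intro V V' b y x d len ans p inv hy hx hd hwalk
    rw [pvWalkG] at hwalk
    by_cases hmem : (y * w + x) * 4 + d ∈ V
    · rw [if_pos hmem] at hwalk
      obtain ⟨hp, hV⟩ : 0 = p ∧ V = V' := by simpa using hwalk
      subst hp; subst hV
      have hbg : pvBoardGet b y x d = true := (inv.2.2.2 y x d hy hx hd).mpr hmem
      refine ⟨b, ?_, inv⟩
      rw [pvShoot, if_pos hbg]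
      simp
    · rw [if_neg hmem] at hwalk
      rcases Option.map_eq_some_iff.mp hwalk with ⟨⟨p', V''⟩, hrec, heq⟩
      obtain ⟨hp, hV'⟩ : p' + 1 = p ∧ V'' = V' := by simpa using heq
      rw [hV'] at hrec
      have hbg : pvBoardGet b y x d = false := by
        cases hb : pvBoardGet b y x d
        · rfl
        · exact absurd ((inv.2.2.2 y x d hy hx hd).mp hb) hmem
      have hy' := pvStepY_lt h y d hy
      have hx' := pvStepX_lt w x d hx
      have hd' := pvStepD_lt grid (pvStepY h y d) (pvStepX w x d) d hd
      rw [pvNext_enc grid h w y x d hy hx hd] at hrec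
      have inv' := pvBoardInv_set h w b V inv y x d hy hx hd
      obtain ⟨b', hb', hinv'⟩ := ih (insert ((y * w + x) * 4 + d) V) V'
        (pvBoardSet b y x d) (pvStepY h y d) (pvStepX w x d)
        (pvStepD grid (pvStepY h y d) (pvStepX w x d) d) (len + 1) ans p'
        inv' hy' hx' hd' hrec
      refine ⟨b', ?_, hinv'⟩
      rw [pvShoot, if_neg (by simp [hbg])]
      show pvShoot grid h w fuel (pvBoardSet b y x d) (pvStepY h y d) (pvStepX w x d)
          (pvStepD grid (pvStepY h y d) (pvStepX w x d) d) (len + 1) ans = _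
      rw [hb']
      have h1 : len + 1 + p' = len + p := by omega
      rw [h1]

-- ---------- outer loops: both ports process the same flat start list ----------

theorem pvFoldl_flatMap {α β γ : Type} (l : List α) (f : α → List β)
    (g : γ → β → γ) (init : γ) :
    (l.flatMap f).foldl g init = l.foldl (fun acc x => (f x).foldl g acc) init := by
  induction l generalizing init with
  | nil => rfl
  | cons a l ih => rw [List.flatMap_cons, List.foldl_append, List.foldl_cons, ih]

theorem pvRangeProd (a b : Nat) :
    (List.range a).flatMap (fun i => (List.range b).map (fun j => i * b + j)) =
      List.range (a * b) := by
  induction a with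
  | zero => simp
  | succ a ih =>
    rw [List.range_succ, List.flatMap_append, ih, Nat.succ_mul, List.range_add]
    simp

def pvStarts (h w : Nat) : List (Nat × Nat × Nat) :=
  (List.range h).flatMap (fun i =>
    (List.range w).flatMap (fun j => (List.range 4).map (fun d => (i, j, d))))

theorem pvStarts_mem (h w : Nat) (t : Nat × Nat × Nat) (ht : t ∈ pvStarts h w) :
    t.1 < h ∧ t.2.1 < w ∧ t.2.2 < 4 := by
  rcases t with ⟨i, j, d⟩
  simp only [pvStarts, List.mem_flatMap, List.mem_map, List.mem_range] at ht
  obtain ⟨i', hi', j', hj', d', hd', he⟩ := ht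
  cases he
  exact ⟨hi', hj', by omega⟩

theorem pvStartsEnc (h w : Nat) :
    (pvStarts h w).map (fun t => (t.1 * w + t.2.1) * 4 + t.2.2) = List.range (4 * h * w) := by
  have e1 : (pvStarts h w).map (fun t => (t.1 * w + t.2.1) * 4 + t.2.2) =
      (List.range h).flatMap (fun i =>
        (List.range w).flatMap (fun j =>
          (List.range 4).map (fun d => (i * w + j) * 4 + d))) := by
    unfold pvStarts
    rw [List.map_flatMap]
    congr 1
    funext i
    rw [List.map_flatMap]
    congr 1
  have e2 : ((List.range h).flatMap (fun i => (List.range w).map (fun j => i * w + j))).flatMap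
      (fun k => (List.range 4).map (fun d => k * 4 + d)) =
      (List.range h).flatMap (fun i =>
        (List.range w).flatMap (fun j =>
          (List.range 4).map (fun d => (i * w + j) * 4 + d))) := by
    rw [List.flatMap_assoc]
    congr 1
    funext i
    rw [List.flatMap_map]
  rw [e1, ← e2, pvRangeProd, pvRangeProd]
  congr 1
  ring

theorem pvFoldA (grid : List String) (h w : Nat) :
    ∀ (ts : List (Nat × Nat × Nat)) (V : Finset Nat) (b : List (List (List Bool)))
      (ans : List Int),
      (∀ t ∈ ts, t.1 < h ∧ t.2.1 < w ∧ t.2.2 < 4) →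
      pvBoardInv h w b V → pvStable (pvNext grid h w) (4 * h * w) V →
      ∃ (res : List Int × Finset Nat) (b' : List (List (List Bool))),
        pvProcess (pvNext grid h w) (4 * h * w)
            (ts.map (fun t => (t.1 * w + t.2.1) * 4 + t.2.2)) V ans = some res ∧
        ts.foldl (fun acc t =>
            pvShoot grid h w (4 * h * w + 1) acc.2 t.1 t.2.1 t.2.2 0 acc.1) (ans, b) =
          (res.1, b') ∧
        pvBoardInv h w b' res.2 ∧ pvStable (pvNext grid h w) (4 * h * w) res.2 := by
  intro ts
  induction ts with
  | nil =>
    intro V b ans _ inv hst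
    exact ⟨(ans, V), b, rfl, rfl, inv, hst⟩
  | cons t ts ih =>
    intro V b ans hb inv hst
    obtain ⟨hy, hx, hd⟩ := hb t (List.mem_cons_self ..)
    have hf : ∀ s, s < 4 * h * w → pvNext grid h w s < 4 * h * w := pvNext_lt grid h w
    have hinj := pvNext_inj grid h w
    have hcodeN : (t.1 * w + t.2.1) * 4 + t.2.2 < 4 * h * w := pvEnc_lt h w _ _ _ hy hx hd
    by_cases hmem : (t.1 * w + t.2.1) * 4 + t.2.2 ∈ V
    · have hwalk : pvWalkG (pvNext grid h w) (4 * h * w + 1) V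
          ((t.1 * w + t.2.1) * 4 + t.2.2) = some (0, V) :=
        pvWalkG_visited (pvNext grid h w) (4 * h * w) V _ hmem
      obtain ⟨b2, hb2, hinv2⟩ := pvShootSim grid h w (4 * h * w + 1) V V b
        t.1 t.2.1 t.2.2 0 ans 0 inv hy hx hd hwalk
      obtain ⟨res, b', hproc, hfold, hinv', hst'⟩ :=
        ih V b2 ans (fun u hu => hb u (List.mem_cons_of_mem _ hu)) hinv2 hst
      refine ⟨res, b', ?_, ?_, hinv', hst'⟩
      · rw [List.map_cons, pvProcess, hwalk]
        simpa using hproc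
      · rw [List.foldl_cons]
        dsimp only
        have hstep : pvShoot grid h w (4 * h * w + 1) b t.1 t.2.1 t.2.2 0 ans = (ans, b2) := by
          simpa using hb2
        rw [hstep]
        exact hfold
    · have hwalk := pvWalkG_fresh (pvNext grid h w) (4 * h * w) hf hinj V hst
        ((t.1 * w + t.2.1) * 4 + t.2.2) hcodeN hmem
      have hppos := (pvPeriod_pos (pvNext grid h w) (4 * h * w) hf hinj _ hcodeN).1
      obtain ⟨b2, hb2, hinv2⟩ := pvShootSim grid h w (4 * h * w + 1) V _ b
        t.1 t.2.1 t.2.2 0 ans _ inv hy hx hd hwalk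
      have hst2 := pvStable_union_img (pvNext grid h w) (4 * h * w) hf hinj V hst _ hcodeN
      obtain ⟨res, b', hproc, hfold, hinv', hst'⟩ :=
        ih _ b2 (ans ++ [((Function.minimalPeriod (pvNext grid h w)
            ((t.1 * w + t.2.1) * 4 + t.2.2) : Nat) : Int)])
          (fun u hu => hb u (List.mem_cons_of_mem _ hu)) hinv2 hst2
      refine ⟨res, b', ?_, ?_, hinv', hst'⟩
      · have hne : Function.minimalPeriod (pvNext grid h w)
            ((t.1 * w + t.2.1) * 4 + t.2.2) ≠ 0 := by omega
        rw [List.map_cons, pvProcess, hwalk]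
        simpa [if_pos hne] using hproc
      · rw [List.foldl_cons]
        dsimp only
        have hne : Function.minimalPeriod (pvNext grid h w)
            ((t.1 * w + t.2.1) * 4 + t.2.2) ≠ 0 := by omega
        have hstep : pvShoot grid h w (4 * h * w + 1) b t.1 t.2.1 t.2.2 0 ans =
            (ans ++ [((Function.minimalPeriod (pvNext grid h w)
              ((t.1 * w + t.2.1) * 4 + t.2.2) : Nat) : Int)], b2) := by
          rw [hb2]
          simp [hne]
        rw [hstep]
        exact hfold

-- ---------- the canonical-representative characterisation ----------

-- 'no state of the first N iterates is smaller than t': t is its cycle's leader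
def pvFreshB (f : Nat → Nat) (N t : Nat) : Bool :=
  (List.range N).all (fun k => ! decide (f^[k] t < t))

theorem pvFreshB_iff (f : Nat → Nat) (N t : Nat) :
    pvFreshB f N t = true ↔ ∀ k, k < N → ¬ f^[k] t < t := by
  simp [pvFreshB]

-- the visited set after A has processed all starts < s
def pvVset (f : Nat → Nat) (N s : Nat) : Finset Nat :=
  (Finset.range N).filter (fun t => ∃ k ∈ Finset.range N, f^[k] t < s)

theorem pvVset_mem (f : Nat → Nat) (N s t : Nat) :
    t ∈ pvVset f N s ↔ t < N ∧ ∃ k, k < N ∧ f^[k] t < s := by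
  simp [pvVset]

theorem pvVset_zero (f : Nat → Nat) (N : Nat) : pvVset f N 0 = ∅ := by
  ext t
  simp [pvVset_mem]

theorem pvVset_stable (f : Nat → Nat) (N : Nat) (hf : ∀ s, s < N → f s < N)
    (hinj : ∀ a b, a < N → b < N → f a = f b → a = b) (s : Nat) :
    pvStable f N (pvVset f N s) := by
  constructor
  · intro t htm
    exact ((pvVset_mem f N s t).mp htm).1
  · intro t htm
    obtain ⟨htN, k, hk, hks⟩ := (pvVset_mem f N s t).mp htm
    refine (pvVset_mem f N s (f t)).mpr ⟨hf t htN, ?_⟩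
    rcases Nat.eq_zero_or_pos k with rfl | hkpos
    · obtain ⟨hpt, hfix⟩ := pvPeriod_pos f N hf hinj t htN
      have hle := pvPeriod_le f N hf hinj t htN
      refine ⟨Function.minimalPeriod f t - 1, by omega, ?_⟩
      have h2 : f^[Function.minimalPeriod f t - 1] (f t) = t := by
        rw [← Function.iterate_succ_apply]
        have he : (Function.minimalPeriod f t - 1).succ = Function.minimalPeriod f t := by omega
        rw [he, hfix]
      rw [h2]
      simpa using hks
    · refine ⟨k - 1, by omega, ?_⟩
      have h2 : f^[k - 1] (f t) = f^[k] t := by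
        rw [← Function.iterate_succ_apply]
        have he : (k - 1).succ = k := by omega
        rw [he]
      rw [h2]
      exact hks

theorem pvOrbitSym (f : Nat → Nat) (N : Nat) (hf : ∀ s, s < N → f s < N)
    (hinj : ∀ a b, a < N → b < N → f a = f b → a = b)
    (s t : Nat) (_hs : s < N) (ht : t < N)
    (h : ∃ k, k < N ∧ f^[k] t = s) : ∃ j, j < N ∧ f^[j] s = t := by
  obtain ⟨k, hk, hks⟩ := h
  obtain ⟨hpt, hfix⟩ := pvPeriod_pos f N hf hinj t ht
  have hle := pvPeriod_le f N hf hinj t ht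
  have hmod : f^[k % Function.minimalPeriod f t] t = s := by
    rw [Function.iterate_mod_minimalPeriod_eq]
    exact hks
  by_cases h0 : k % Function.minimalPeriod f t = 0
  · have hts : t = s := by
      rw [h0] at hmod
      simpa using hmod
    exact ⟨0, by omega, by simp [hts]⟩
  · have hklt := Nat.mod_lt k hpt
    refine ⟨Function.minimalPeriod f t - k % Function.minimalPeriod f t, by omega, ?_⟩
    rw [← hmod, ← Function.iterate_add_apply]
    have he : Function.minimalPeriod f t - k % Function.minimalPeriod f t +
        k % Function.minimalPeriod f t = Function.minimalPeriod f t := by omega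
    rw [he, hfix]

theorem pvImgChar (f : Nat → Nat) (N : Nat) (hf : ∀ s, s < N → f s < N)
    (hinj : ∀ a b, a < N → b < N → f a = f b → a = b)
    (s : Nat) (hs : s < N) (t : Nat) :
    t ∈ pvImg f s (Function.minimalPeriod f s) ↔ ∃ j, j < N ∧ f^[j] s = t := by
  obtain ⟨hps, hfix⟩ := pvPeriod_pos f N hf hinj s hs
  have hle := pvPeriod_le f N hf hinj s hs
  rw [pvMem_img]
  constructor
  · rintro ⟨k, hk, rfl⟩
    exact ⟨k, by omega, rfl⟩
  · rintro ⟨j, hj, rfl⟩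
    exact ⟨j % Function.minimalPeriod f s, Nat.mod_lt j hps,
      Function.iterate_mod_minimalPeriod_eq⟩

theorem pvVset_succ_visited (f : Nat → Nat) (N : Nat) (hf : ∀ s, s < N → f s < N)
    (hinj : ∀ a b, a < N → b < N → f a = f b → a = b)
    (s : Nat) (_hs : s < N) (hmem : s ∈ pvVset f N s) :
    pvVset f N (s + 1) = pvVset f N s := by
  ext t
  rw [pvVset_mem, pvVset_mem]
  constructor
  · rintro ⟨htN, k, hk, hks⟩
    refine ⟨htN, ?_⟩
    rcases Nat.lt_or_ge (f^[k] t) s with h | h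
    · exact ⟨k, hk, h⟩
    · have hkeq : f^[k] t = s := by omega
      obtain ⟨_, k2, hk2, hk2s⟩ := (pvVset_mem f N s s).mp hmem
      obtain ⟨hpt, hfix⟩ := pvPeriod_pos f N hf hinj t htN
      have hle := pvPeriod_le f N hf hinj t htN
      refine ⟨(k2 + k) % Function.minimalPeriod f t,
        by have := Nat.mod_lt (k2 + k) hpt; omega, ?_⟩
      rw [Function.iterate_mod_minimalPeriod_eq, Function.iterate_add_apply, hkeq]
      exact hk2s
  · rintro ⟨htN, k, hk, hks⟩
    exact ⟨htN, k, hk, by omega⟩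

theorem pvVset_succ_fresh (f : Nat → Nat) (N : Nat) (hf : ∀ s, s < N → f s < N)
    (hinj : ∀ a b, a < N → b < N → f a = f b → a = b)
    (s : Nat) (hs : s < N) :
    pvVset f N (s + 1) = pvVset f N s ∪ pvImg f s (Function.minimalPeriod f s) := by
  ext t
  rw [Finset.mem_union, pvVset_mem, pvVset_mem, pvImgChar f N hf hinj s hs t]
  constructor
  · rintro ⟨htN, k, hk, hks⟩
    rcases Nat.lt_or_ge (f^[k] t) s with h | h
    · exact Or.inl ⟨htN, k, hk, h⟩
    · have hkeq : f^[k] t = s := by omega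
      exact Or.inr (pvOrbitSym f N hf hinj s t hs htN ⟨k, hk, hkeq⟩)
  · rintro (⟨htN, k, hk, hks⟩ | ⟨j, hj, rfl⟩)
    · exact ⟨htN, k, hk, by omega⟩
    · have htN : f^[j] s < N := pvIter_lt f N hf j s hs
      obtain ⟨k, hk, hkt⟩ := pvOrbitSym f N hf hinj (f^[j] s) s htN hs ⟨j, hj, rfl⟩
      exact ⟨htN, k, hk, by omega⟩

theorem pvFreshB_not_mem (f : Nat → Nat) (N s : Nat) (hs : s < N) :
    pvFreshB f N s = true ↔ s ∉ pvVset f N s := by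
  rw [pvFreshB_iff, pvVset_mem]
  constructor
  · rintro h ⟨_, k, hk, hks⟩
    exact h k hk hks
  · intro h k hk hks
    exact h ⟨hs, k, hk, hks⟩

-- A's whole scan produces exactly one length per cycle, at the cycle's smallest state
theorem pvProcA (f : Nat → Nat) (N : Nat) (hf : ∀ s, s < N → f s < N)
    (hinj : ∀ a b, a < N → b < N → f a = f b → a = b) :
    ∀ (k s : Nat) (ans : List Int), s + k ≤ N →
      pvProcess f N (List.range' s k) (pvVset f N s) ans =
        some (ans ++ (List.range' s k).flatMap
            (fun t => if pvFreshB f N t then [((Function.minimalPeriod f t : Nat) : Int)]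
              else []),
          pvVset f N (s + k)) := by
  intro k
  induction k with
  | zero =>
    intro s ans h
    simp [pvProcess]
  | succ k ih =>
    intro s ans h
    have hsN : s < N := by omega
    rw [List.range'_succ]
    by_cases hfresh : pvFreshB f N s = true
    · have hnot : s ∉ pvVset f N s := (pvFreshB_not_mem f N s hsN).mp hfresh
      have hwalk := pvWalkG_fresh f N hf hinj (pvVset f N s)
        (pvVset_stable f N hf hinj s) s hsN hnot
      have hps := (pvPeriod_pos f N hf hinj s hsN).1
      rw [pvProcess, hwalk]
      dsimp only
      rw [← pvVset_succ_fresh f N hf hinj s hsN]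
      rw [ih (s + 1) _ (by omega)]
      have he : s + 1 + k = s + (k + 1) := by omega
      rw [he, List.flatMap_cons, if_pos hfresh]
      have hne : Function.minimalPeriod f s ≠ 0 := by omega
      simp [hne]
    · have hmem : s ∈ pvVset f N s := by
        by_contra hc
        exact hfresh ((pvFreshB_not_mem f N s hsN).mpr hc)
      have hwalk := pvWalkG_visited f N (pvVset f N s) s hmem
      rw [pvProcess, hwalk]
      dsimp only
      have hv := pvVset_succ_visited f N hf hinj s hsN hmem
      rw [← hv, ih (s + 1) _ (by omega)]
      have he : s + 1 + k = s + (k + 1) := by omega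
      rw [he, List.flatMap_cons, if_neg hfresh]
      simp

-- ---------- B's walk: triple coding and the lexicographic order ----------

def pvEnc (w : Nat) (t : Nat × Nat × Nat) : Nat := (t.1 * w + t.2.1) * 4 + t.2.2

def pvTB (h w : Nat) (t : Nat × Nat × Nat) : Prop :=
  t.1 < h ∧ t.2.1 < w ∧ t.2.2 < 4

theorem pvEnc_inj_t (w : Nat) (a b : Nat × Nat × Nat)
    (ha : a.2.1 < w ∧ a.2.2 < 4) (hb : b.2.1 < w ∧ b.2.2 < 4)
    (h : pvEnc w a = pvEnc w b) : a = b := by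
  obtain ⟨hy, hx, hd⟩ := pvEnc_inj w a.1 a.2.1 a.2.2 b.1 b.2.1 b.2.2
    ha.1 ha.2 hb.1 hb.2 h
  exact Prod.ext hy (Prod.ext hx hd)

theorem pvEncLt_of_lex (w : Nat) (a b : Nat × Nat × Nat)
    (ha : a.2.1 < w ∧ a.2.2 < 4)
    (h : a.1 < b.1 ∨ (a.1 = b.1 ∧ (a.2.1 < b.2.1 ∨ (a.2.1 = b.2.1 ∧ a.2.2 < b.2.2)))) :
    pvEnc w a < pvEnc w b := by
  unfold pvEnc
  rcases h with h | ⟨h1, h | ⟨h2, h3⟩⟩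
  · have hm : (a.1 + 1) * w ≤ b.1 * w := Nat.mul_le_mul_right w (by omega)
    have hexp : (a.1 + 1) * w = a.1 * w + w := by ring
    have hk : a.1 * w + a.2.1 < b.1 * w + b.2.1 := by
      have := ha.1
      omega
    have hexp2 : (a.1 * w + a.2.1 + 1) * 4 = (a.1 * w + a.2.1) * 4 + 4 := by ring
    have hm2 : (a.1 * w + a.2.1 + 1) * 4 ≤ (b.1 * w + b.2.1) * 4 :=
      Nat.mul_le_mul_right 4 (by omega)
    have := ha.2
    omega
  · rw [h1]
    have hk : a.1 * w + a.2.1 < a.1 * w + b.2.1 := by omega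
    have hexp2 : (a.1 * w + a.2.1 + 1) * 4 = (a.1 * w + a.2.1) * 4 + 4 := by ring
    have hm2 : (a.1 * w + a.2.1 + 1) * 4 ≤ (a.1 * w + b.2.1) * 4 :=
      Nat.mul_le_mul_right 4 (by omega)
    have := ha.2
    omega
  · rw [h1, h2]
    omega

theorem pvEncLt_iff (w : Nat) (a b : Nat × Nat × Nat)
    (ha : a.2.1 < w ∧ a.2.2 < 4) (hb : b.2.1 < w ∧ b.2.2 < 4) :
    pvEnc w a < pvEnc w b ↔
      (a.1 < b.1 ∨ (a.1 = b.1 ∧ (a.2.1 < b.2.1 ∨ (a.2.1 = b.2.1 ∧ a.2.2 < b.2.2)))) := by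
  constructor
  · intro hlt
    rcases Nat.lt_trichotomy a.1 b.1 with h | h | h
    · exact Or.inl h
    · rcases Nat.lt_trichotomy a.2.1 b.2.1 with h2 | h2 | h2
      · exact Or.inr ⟨h, Or.inl h2⟩
      · rcases Nat.lt_trichotomy a.2.2 b.2.2 with h3 | h3 | h3
        · exact Or.inr ⟨h, Or.inr ⟨h2, h3⟩⟩
        · exfalso
          have : pvEnc w a = pvEnc w b := by
            unfold pvEnc
            rw [h, h2, h3]
          omega
        · exact absurd (pvEncLt_of_lex w b a hb
            (Or.inr ⟨h.symm, Or.inr ⟨h2.symm, h3⟩⟩)) (by omega)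
      · exact absurd (pvEncLt_of_lex w b a hb (Or.inr ⟨h.symm, Or.inl h2⟩)) (by omega)
    · exact absurd (pvEncLt_of_lex w b a hb (Or.inl h)) (by omega)
  · exact pvEncLt_of_lex w a b ha

theorem pvLtT_iff (w : Nat) (a b : Nat × Nat × Nat)
    (ha : a.2.1 < w ∧ a.2.2 < 4) (hb : b.2.1 < w ∧ b.2.2 < 4) :
    pvLtT a b = true ↔ pvEnc w a < pvEnc w b := by
  rw [pvEncLt_iff w a b ha hb]
  simp [pvLtT]

theorem pvStepB_tb (grid : List String) (h w : Nat) (t : Nat × Nat × Nat)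
    (ht : pvTB h w t) : pvTB h w (pvStepB grid h w t) := by
  obtain ⟨y, x, d⟩ := t
  obtain ⟨hy, hx, hd⟩ := ht
  rw [pvStepB_eq grid h w y x d hy hx hd]
  exact ⟨pvStepY_lt h y d hy, pvStepX_lt w x d hx, pvStepD_lt grid _ _ d hd⟩

theorem pvStepB_enc (grid : List String) (h w : Nat) (t : Nat × Nat × Nat)
    (ht : pvTB h w t) : pvEnc w (pvStepB grid h w t) = pvNext grid h w (pvEnc w t) := by
  obtain ⟨y, x, d⟩ := t
  obtain ⟨hy, hx, hd⟩ := ht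
  rw [pvStepB_eq grid h w y x d hy hx hd]
  unfold pvEnc
  dsimp only
  rw [pvNext_enc grid h w y x d hy hx hd]

theorem pvEnc_lt_t (h w : Nat) (t : Nat × Nat × Nat) (ht : pvTB h w t) :
    pvEnc w t < 4 * h * w :=
  pvEnc_lt h w t.1 t.2.1 t.2.2 ht.1 ht.2.1 ht.2.2

-- if no iterate in [m, period) is below the start, B's walk returns the period
theorem pvWalkB_returns (grid : List String) (h w : Nat) (t0 : Nat × Nat × Nat)
    (ht0 : pvTB h w t0) :
    ∀ (fuel m : Nat) (cur : Nat × Nat × Nat), pvTB h w cur →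
      pvEnc w cur = (pvNext grid h w)^[m] (pvEnc w t0) →
      1 ≤ m → m ≤ Function.minimalPeriod (pvNext grid h w) (pvEnc w t0) →
      Function.minimalPeriod (pvNext grid h w) (pvEnc w t0) - m < fuel →
      (∀ k, m ≤ k → k < Function.minimalPeriod (pvNext grid h w) (pvEnc w t0) →
        ¬ (pvNext grid h w)^[k] (pvEnc w t0) < pvEnc w t0) →
      pvWalkB grid h w t0 fuel cur m =
        Function.minimalPeriod (pvNext grid h w) (pvEnc w t0) := by
  have hf : ∀ s, s < 4 * h * w → pvNext grid h w s < 4 * h * w := pvNext_lt grid h w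
  have hinj := pvNext_inj grid h w
  have hs0 : pvEnc w t0 < 4 * h * w := pvEnc_lt_t h w t0 ht0
  obtain ⟨hps, hfix⟩ := pvPeriod_pos (pvNext grid h w) (4 * h * w) hf hinj _ hs0
  intro fuel
  induction fuel with
  | zero => intro m cur _ _ _ _ hfuel _; omega
  | succ fuel ih =>
    intro m cur htb henc hm1 hmle hfuel hcond
    rcases Nat.lt_or_ge m (Function.minimalPeriod (pvNext grid h w) (pvEnc w t0)) with hlt | hge
    · have hne : cur ≠ t0 := by
        intro hc
        rw [hc] at henc
        exact pvOrbit_ne (pvNext grid h w) (4 * h * w) hf hinj _ hs0 0 m (by omega) hlt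
          (by simpa using henc)
      rw [pvWalkB, if_neg hne]
      have hnlt : ¬ pvLtT cur t0 = true := by
        rw [pvLtT_iff w cur t0 ⟨htb.2.1, htb.2.2⟩ ⟨ht0.2.1, ht0.2.2⟩, henc]
        exact hcond m (by omega) hlt
      rw [if_neg (by simpa using hnlt)]
      exact ih (m + 1) (pvStepB grid h w cur) (pvStepB_tb grid h w cur htb)
        (by rw [pvStepB_enc grid h w cur htb, henc]; exact (Function.iterate_succ_apply' (pvNext grid h w) m (pvEnc w t0)).symm)
        (by omega) (by omega) (by omega)
        (fun k hk1 hk2 => hcond k (by omega) hk2)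
    · have hmeq : m = Function.minimalPeriod (pvNext grid h w) (pvEnc w t0) := by omega
      have hcur : cur = t0 := by
        apply pvEnc_inj_t w cur t0 ⟨htb.2.1, htb.2.2⟩ ⟨ht0.2.1, ht0.2.2⟩
        rw [henc, hmeq, hfix]
      rw [pvWalkB, if_pos hcur, hmeq]

-- if some iterate in [m, period) is below the start, B's walk aborts with 0
theorem pvWalkB_aborts (grid : List String) (h w : Nat) (t0 : Nat × Nat × Nat)
    (ht0 : pvTB h w t0) :
    ∀ (fuel m : Nat) (cur : Nat × Nat × Nat), pvTB h w cur →
      pvEnc w cur = (pvNext grid h w)^[m] (pvEnc w t0) →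
      1 ≤ m →
      Function.minimalPeriod (pvNext grid h w) (pvEnc w t0) - m < fuel →
      (∃ k, m ≤ k ∧ k < Function.minimalPeriod (pvNext grid h w) (pvEnc w t0) ∧
        (pvNext grid h w)^[k] (pvEnc w t0) < pvEnc w t0) →
      pvWalkB grid h w t0 fuel cur m = 0 := by
  have hf : ∀ s, s < 4 * h * w → pvNext grid h w s < 4 * h * w := pvNext_lt grid h w
  have hinj := pvNext_inj grid h w
  have hs0 : pvEnc w t0 < 4 * h * w := pvEnc_lt_t h w t0 ht0
  intro fuel
  induction fuel with
  | zero =>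
    intro m cur _ _ _ hfuel hex
    obtain ⟨k, hk1, hk2, _⟩ := hex
    omega
  | succ fuel ih =>
    intro m cur htb henc hm1 hfuel hex
    obtain ⟨k, hk1, hk2, hklt⟩ := hex
    have hmlt : m < Function.minimalPeriod (pvNext grid h w) (pvEnc w t0) := by omega
    have hne : cur ≠ t0 := by
      intro hc
      rw [hc] at henc
      exact pvOrbit_ne (pvNext grid h w) (4 * h * w) hf hinj _ hs0 0 m (by omega) hmlt
        (by simpa using henc)
    rw [pvWalkB, if_neg hne]
    by_cases habort : (pvNext grid h w)^[m] (pvEnc w t0) < pvEnc w t0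
    · rw [if_pos]
      rw [pvLtT_iff w cur t0 ⟨htb.2.1, htb.2.2⟩ ⟨ht0.2.1, ht0.2.2⟩, henc]
      exact habort
    · have hnlt : ¬ pvLtT cur t0 = true := by
        rw [pvLtT_iff w cur t0 ⟨htb.2.1, htb.2.2⟩ ⟨ht0.2.1, ht0.2.2⟩, henc]
        exact habort
      rw [if_neg (by simpa using hnlt)]
      have hkm : k ≠ m := by
        intro hc
        rw [hc] at hklt
        exact habort hklt
      exact ih (m + 1) (pvStepB grid h w cur) (pvStepB_tb grid h w cur htb)
        (by rw [pvStepB_enc grid h w cur htb, henc]; exact (Function.iterate_succ_apply' (pvNext grid h w) m (pvEnc w t0)).symm)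
        (by omega) (by omega) ⟨k, by omega, hk2, hklt⟩

-- B's per-start value: the period at a cycle leader, 0 elsewhere
theorem pvWalkB_start (grid : List String) (h w : Nat) (t : Nat × Nat × Nat)
    (ht : pvTB h w t) :
    pvWalkB grid h w t (4 * h * w + 1) (pvStepB grid h w t) 1 =
      (if pvFreshB (pvNext grid h w) (4 * h * w) (pvEnc w t) = true then
        Function.minimalPeriod (pvNext grid h w) (pvEnc w t) else 0) := by
  have hf : ∀ s, s < 4 * h * w → pvNext grid h w s < 4 * h * w := pvNext_lt grid h w
  have hinj := pvNext_inj grid h w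
  have hs0 : pvEnc w t < 4 * h * w := pvEnc_lt_t h w t ht
  obtain ⟨hps, hfix⟩ := pvPeriod_pos (pvNext grid h w) (4 * h * w) hf hinj _ hs0
  have hle := pvPeriod_le (pvNext grid h w) (4 * h * w) hf hinj _ hs0
  have henc1 : pvEnc w (pvStepB grid h w t) =
      (pvNext grid h w)^[1] (pvEnc w t) := by
    rw [pvStepB_enc grid h w _ ht]
    simp
  by_cases hc : pvFreshB (pvNext grid h w) (4 * h * w) (pvEnc w t) = true
  · rw [if_pos hc]
    apply pvWalkB_returns grid h w t ht (4 * h * w + 1) 1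
      (pvStepB grid h w t) (pvStepB_tb grid h w _ ht) henc1
      (by omega) (by omega) (by omega)
    intro k hk1 hk2
    exact (pvFreshB_iff _ _ _).mp hc k (by omega)
  · rw [if_neg hc]
    have hex : ∃ k, k < 4 * h * w ∧
        (pvNext grid h w)^[k] (pvEnc w t) < pvEnc w t := by
      by_contra hno
      apply hc
      rw [pvFreshB_iff]
      intro k hk hlt
      exact hno ⟨k, hk, hlt⟩
    obtain ⟨k, hk, hklt⟩ := hex
    have hkmod : (pvNext grid h w)^[k % Function.minimalPeriod (pvNext grid h w)
        (pvEnc w t)] (pvEnc w t) < pvEnc w t := by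
      rw [Function.iterate_mod_minimalPeriod_eq]
      exact hklt
    have hk0 : k % Function.minimalPeriod (pvNext grid h w) (pvEnc w t) ≠ 0 := by
      intro hc0
      rw [hc0] at hkmod
      simp at hkmod
    apply pvWalkB_aborts grid h w t ht (4 * h * w + 1) 1
      (pvStepB grid h w t) (pvStepB_tb grid h w _ ht) henc1
      (by omega) (by omega)
    exact ⟨k % Function.minimalPeriod (pvNext grid h w) (pvEnc w t),
      by omega, Nat.mod_lt k hps, hkmod⟩

-- ===== VERDICT (by name: the statement is the Claim_ definition above) =====
theorem solution_spec : Claim_equal_solution := by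
  unfold Claim_equal_solution
  intro grid _ _
  unfold Spec_solution
  set h := grid.length with hh
  set w := (grid.getD 0 "").toList.length with hw
  set N := 4 * h * w with hN
  set f := pvNext grid h w with hfdef
  have hf : ∀ s, s < N → f s < N := pvNext_lt grid h w
  have hinj := pvNext_inj grid h w
  -- the one list both ports sort
  set L : List Int := (List.range N).flatMap
    (fun t => if pvFreshB f N t then [((Function.minimalPeriod f t : Nat) : Int)] else [])
    with hL
  -- ===== A's side =====
  have hfoldAeq :
      ∀ (a0 : List Int × List (List (List Bool))),
        (List.range h).foldl (fun acc i =>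
          (List.range w).foldl (fun acc j =>
            (List.range 4).foldl (fun (acc : List Int × List (List (List Bool))) d =>
              pvShoot grid h w (4 * h * w + 1) acc.2 i j d 0 acc.1) acc) acc) a0
        = (pvStarts h w).foldl
            (fun acc t => pvShoot grid h w (4 * h * w + 1) acc.2 t.1 t.2.1 t.2.2 0 acc.1)
            a0 := by
    intro a0
    unfold pvStarts
    rw [pvFoldl_flatMap]
    congr 1
    funext acc i
    rw [pvFoldl_flatMap]
    congr 1
  obtain ⟨resA, bA, hprocA, hfoldA, _, _⟩ :=
    pvFoldA grid h w (pvStarts h w) ∅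
      ((List.range h).map (fun _ =>
        (List.range w).map (fun _ => (List.range 4).map (fun _ => false))))
      [] (pvStarts_mem _ _) (pvBoardInv_init _ _) ⟨by simp, by simp⟩
  rw [pvStartsEnc] at hprocA
  have hprocA' := pvProcA f N hf hinj N 0 [] (by omega)
  rw [pvVset_zero, ← List.range_eq_range'] at hprocA'
  rw [hprocA'] at hprocA
  have hresA : resA = (L, pvVset f N (0 + N)) := by
    have := Option.some.inj hprocA
    rw [← this]
    simp [hL]
  have hA : solution grid = PySem.List.sorted L (fun v => v) false := by
    unfold solution
    dsimp only
    rw [← hh, ← hw, hfoldAeq, hfoldA, hresA]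
  -- ===== B's side =====
  have hfoldBeq :
      (List.range h).foldl (fun acc y =>
        (List.range w).foldl (fun acc x =>
          (List.range 4).foldl (fun (acc : List Int) d =>
            if pvWalkB grid h w (y, x, d) (4 * h * w + 1)
                (pvStepB grid h w (y, x, d)) 1 ≠ 0 then
              acc ++ [((pvWalkB grid h w (y, x, d) (4 * h * w + 1)
                (pvStepB grid h w (y, x, d)) 1 : Nat) : Int)]
            else acc) acc) acc) ([] : List Int)
      = (pvStarts h w).foldl
          (fun acc t =>
            if pvWalkB grid h w t (4 * h * w + 1) (pvStepB grid h w t) 1 ≠ 0 then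
              acc ++ [((pvWalkB grid h w t (4 * h * w + 1)
                (pvStepB grid h w t) 1 : Nat) : Int)]
            else acc) ([] : List Int) := by
    unfold pvStarts
    rw [pvFoldl_flatMap]
    congr 1
    funext acc i
    rw [pvFoldl_flatMap]
    congr 1
  have hfoldB2 :
      (pvStarts h w).foldl
          (fun acc t =>
            if pvWalkB grid h w t (4 * h * w + 1) (pvStepB grid h w t) 1 ≠ 0 then
              acc ++ [((pvWalkB grid h w t (4 * h * w + 1)
                (pvStepB grid h w t) 1 : Nat) : Int)]
            else acc) ([] : List Int)
      = (pvStarts h w).foldl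
          (fun acc t => acc ++
            (if pvFreshB f N (pvEnc w t) then
              [((Function.minimalPeriod f (pvEnc w t) : Nat) : Int)] else []))
          ([] : List Int) := by
    apply PySem.List.foldl_congr_mem
    intro acc t ht
    obtain ⟨hy, hx, hd⟩ := pvStarts_mem h w t ht
    have hs0 : pvEnc w t < N := pvEnc_lt_t h w t ⟨hy, hx, hd⟩
    have hps := (pvPeriod_pos f N hf hinj _ hs0).1
    rw [pvWalkB_start grid h w t ⟨hy, hx, hd⟩]
    by_cases hc : pvFreshB f N (pvEnc w t) = true
    · rw [if_pos hc, if_pos hc,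
        if_pos (by omega : ¬ Function.minimalPeriod f (pvEnc w t) = 0)]
    · rw [if_neg hc, if_neg hc]
      simp
  have hfoldB3 :
      (pvStarts h w).foldl
          (fun acc t => acc ++
            (if pvFreshB f N (pvEnc w t) then
              [((Function.minimalPeriod f (pvEnc w t) : Nat) : Int)] else []))
          ([] : List Int) = L := by
    rw [PySem.List.foldl_append_eq_flatMap]
    have hm : (pvStarts h w).flatMap
        (fun t => (if pvFreshB f N (pvEnc w t) then
          [((Function.minimalPeriod f (pvEnc w t) : Nat) : Int)] else [])) =
        ((pvStarts h w).map (fun t => (t.1 * w + t.2.1) * 4 + t.2.2)).flatMap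
          (fun s => (if pvFreshB f N s then
            [((Function.minimalPeriod f s : Nat) : Int)] else [])) := by
      rw [List.flatMap_map]
      rfl
    rw [List.nil_append, hm, pvStartsEnc, hL]
  have hB : solution_alt grid = PySem.List.sorted L (fun v => v) false := by
    unfold solution_alt
    dsimp only
    rw [← hh, ← hw, hfoldBeq, hfoldB2, hfoldB3]
  rw [hA, hB]
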